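-- pv_equiv track=rewrite | github.com/KirilIvanovv/CodeWars | 6-kyu/the-train-problem/the-train-problem.py | is_valid_train_arrangement
-- ===== SOURCE A (Python) =====
-- def is_valid_train_arrangement(before, after):
--     if len(before) != len(after):
--         return False
--
--     b_trains =[(c, i) for i, c in enumerate(before) if c in "<>"]
--     a_trains =[(c, i) for i, c in enumerate(after) if c in "<>"]
--
--     if[c for c, _ in b_trains] != [c for c, _ in a_trains]:
--         return False
--
--     for(c, i_before), (_, i_after) in zip(b_trains, a_trains):
--         if c == '>' and i_after < i_before:
--             return False
--         if c == '<' and i_after > i_before: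
--             return False
--     return True
-- ===== SOURCE B (Python) =====
-- def is_valid_train_arrangement(before, after):
--     # Pending-train queue merge: scan both strings in lockstep; a train seen on one
--     # side but not yet on the other waits in a queue, and each event checks the
--     # direction/char rules locally. No (char, index) lists are ever built.
--     if len(before) != len(after):
--         return False
--     pb = []  # trains already passed in `before`, still awaited in `after`
--     pa = []  # trains already passed in `after`, still awaited in `before`
--     for cb, ca in zip(before, after):
--         bt = cb in "<>"
--         at = ca in "<>"
--         if bt and at and not pb and not pa:
--             # same train at the same position: only the character must agree
--             if cb != ca:
--                 return False
--         else:
--             if bt: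
--                 if pa:
--                     q = pa.pop(0)      # this train already appeared in `after`: it moved left
--                     if cb != q or cb != '<':
--                         return False
--                 else:
--                     if cb != '>':      # it will appear later in `after`: it moved right
--                         return False
--                     pb.append(cb)
--             if at:
--                 if pb:
--                     q = pb.pop(0)      # already appeared in `before`: it moved right
--                     if ca != q or ca != '>':
--                         return False
--                 else:
--                     if ca != '<':      # will appear later in `before`: it moved left
--                         return False
--                     pa.append(ca)
--     return not pb and not pa
-- ===== Notes on version B (the rewrite author's own statement) =====
-- stated objective: alternative
-- what changed: Replaced A's extract-(char,index)-lists / compare-char-lists / zip-and-check pipeline by a lockstep merge with a pending-train queue: trains seen on one string but not yet on the other wait in a FIFO queue and every push/pop checks the character and direction rule locally, so no indices and no intermediate lists are ever computed.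
import Mathlib
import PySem

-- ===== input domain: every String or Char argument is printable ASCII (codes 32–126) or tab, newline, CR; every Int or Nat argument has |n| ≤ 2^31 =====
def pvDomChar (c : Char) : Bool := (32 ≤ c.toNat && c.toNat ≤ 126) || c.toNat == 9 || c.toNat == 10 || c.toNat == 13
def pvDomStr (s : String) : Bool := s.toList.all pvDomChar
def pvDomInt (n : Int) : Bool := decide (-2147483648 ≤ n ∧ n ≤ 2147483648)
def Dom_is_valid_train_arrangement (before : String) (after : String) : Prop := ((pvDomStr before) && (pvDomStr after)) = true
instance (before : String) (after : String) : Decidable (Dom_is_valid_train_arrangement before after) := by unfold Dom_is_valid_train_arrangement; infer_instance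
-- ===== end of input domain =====

-- B replaces A's build-lists/compare/zip pipeline by a lockstep merge with a pending-train
-- queue that checks the char and direction rules locally (alternative decomposition, same cost).

-- ===== PORT A =====
def pvIsTrain (c : Char) : Bool := c == '<' || c == '>'

-- the for-loop over zip with early `return False`
def pvCheckPairs : List ((Char × Int) × (Char × Int)) → Bool
  | [] => true
  | ((c, ib), (_, ia)) :: rest =>
    if c == '>' && ia < ib then false
    else if c == '<' && ia > ib then false
    else pvCheckPairs rest

def is_valid_train_arrangement (before : String) (after : String) : Bool :=
  if PySem.Str.len before != PySem.Str.len after then false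
  else
    let b_trains := ((PySem.List.enumerate before.toList).filter (fun p => pvIsTrain p.2)).map (fun p => (p.2, p.1))
    let a_trains := ((PySem.List.enumerate after.toList).filter (fun p => pvIsTrain p.2)).map (fun p => (p.2, p.1))
    if b_trains.map (·.1) != a_trains.map (·.1) then false
    else pvCheckPairs (b_trains.zip a_trains)

-- ===== PORT B =====
-- one iteration of B's loop body; `none` = early `return False`
def pvStep (cb ca : Char) (pb pa : List Char) : Option (List Char × List Char) :=
  if pvIsTrain cb && pvIsTrain ca && pb.isEmpty && pa.isEmpty then
    if cb != ca then none else some (pb, pa)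
  else
    (if pvIsTrain cb then
       match pa with
       | q :: pa' => if cb != q || cb != '<' then none else some (pb, pa')
       | [] => if cb != '>' then none else some (pb ++ [cb], pa)
     else some (pb, pa)).bind (fun s =>
      if pvIsTrain ca then
        match s.1 with
        | q :: pb' => if ca != q || ca != '>' then none else some (pb', s.2)
        | [] => if ca != '<' then none else some (s.1, s.2 ++ [ca])
      else some s)

-- the loop over zip(before, after), then the final queue-emptiness check
def pvMergeLoop : List Char → List Char → List Char → List Char → Bool
  | cb :: bs, ca :: as_, pb, pa =>
    match pvStep cb ca pb pa with
    | none => false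
    | some (pb', pa') => pvMergeLoop bs as_ pb' pa'
  | _, _, pb, pa => pb.isEmpty && pa.isEmpty

def is_valid_train_arrangement_alt (before : String) (after : String) : Bool :=
  if PySem.Str.len before != PySem.Str.len after then false
  else pvMergeLoop before.toList after.toList [] []

-- ===== PRECONDITION & SPEC =====
def Spec_is_valid_train_arrangement (before : String) (after : String) (out : Bool) : Prop := out = is_valid_train_arrangement_alt before after
instance (before : String) (after : String) (out : Bool) : Decidable (Spec_is_valid_train_arrangement before after out) := by unfold Spec_is_valid_train_arrangement; infer_instance

-- ===== CLAIM (what is proved, stated in full; the proofs are below) =====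
def Claim_equal_is_valid_train_arrangement : Prop := ∀ (before : String) (after : String), Dom_is_valid_train_arrangement before after → Spec_is_valid_train_arrangement before after (is_valid_train_arrangement before after)

-- ===== LEMMAS AND PROOFS =====

-- the list of (train char, index) pairs starting at offset k
def pvT : List Char → Int → List (Char × Int)
  | [], _ => []
  | c :: cs, k => if pvIsTrain c then (c, k) :: pvT cs (k + 1) else pvT cs (k + 1)

-- A's tail computation expressed on extracted train lists
def pvG (x y : List (Char × Int)) : Bool :=
  (x.map (·.1) == y.map (·.1)) && pvCheckPairs (x.zip y)

theorem pvT_eq_enum (l : List Char) : ∀ s : Int,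
    ((PySem.List.enumerate l s).filter (fun p => pvIsTrain p.2)).map (fun p => (p.2, p.1)) = pvT l s := by
  induction l with
  | nil => intro s; simp [pvT, PySem.List.enumerate]
  | cons c cs ih =>
    intro s
    simp only [PySem.List.enumerate_cons, List.filter_cons, pvT]
    by_cases h : pvIsTrain c = true
    · simp [h, ih]
    · simp [h, ih]

theorem pvT_idx_ge (l : List Char) : ∀ (i : Int) (p : Char × Int), p ∈ pvT l i → i ≤ p.2 := by
  induction l with
  | nil => intro i p h; simp [pvT] at h
  | cons c cs ih =>
    intro i p h
    simp only [pvT] at h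
    by_cases hc : pvIsTrain c = true
    · rw [if_pos hc] at h
      rcases List.mem_cons.1 h with h | h
      · subst h; simp
      · have := ih (i + 1) p h; omega
    · rw [if_neg hc] at h
      have := ih (i + 1) p h; omega

theorem pvG_cons (x y : Char × Int) (X Y : List (Char × Int)) :
    pvG (x :: X) (y :: Y) =
      ((x.1 == y.1) && !(x.1 == '>' && decide (y.2 < x.2)) && !(x.1 == '<' && decide (y.2 > x.2)) && pvG X Y) := by
  obtain ⟨c, ib⟩ := x; obtain ⟨c', ia⟩ := y
  simp only [pvG, List.zip_cons_cons, pvCheckPairs, List.map_cons, List.cons_beq_cons]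
  by_cases h1 : (c == '>' && decide (ia < ib)) = true
  · simp [h1]
  · by_cases h2 : (c == '<' && decide (ia > ib)) = true
    · simp [h1, h2]
    · simp only [h1, h2]
      simp only [Bool.not_eq_true] at h1 h2
      simp [Bool.and_comm, Bool.and_left_comm]

-- a pending '<' train from `before` whose partner (if any) lies strictly to its right kills A's check
theorem pvG_bad_b (X Y : List (Char × Int)) (pr : Char × Int) (hm : pr ∈ X)
    (hc : pr.1 = '<') (hy : ∀ y ∈ Y, pr.2 < y.2) : pvG X Y = false := by
  induction X generalizing Y with
  | nil => simp at hm
  | cons x X' ih =>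
    cases Y with
    | nil => simp [pvG]
    | cons y Y' =>
      rw [pvG_cons]
      rcases List.mem_cons.1 hm with h | h
      · subst h
        have : (pr.1 == '<' && decide (y.2 > pr.2)) = true := by
          simp [hc, hy y (List.mem_cons_self)]
        simp [this]
      · have := ih Y' h (fun y hyY => hy y (List.mem_cons_of_mem _ hyY))
        simp [this]

-- a pending '>' train from `after` whose partner (if any) lies strictly to its right kills A's check
theorem pvG_bad_a (X Y : List (Char × Int)) (pr : Char × Int) (hm : pr ∈ Y)
    (hc : pr.1 = '>') (hx : ∀ x ∈ X, pr.2 < x.2) : pvG X Y = false := by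
  induction Y generalizing X with
  | nil => simp at hm
  | cons y Y' ih =>
    cases X with
    | nil => simp [pvG]
    | cons x X' =>
      rw [pvG_cons]
      rcases List.mem_cons.1 hm with h | h
      · subst h
        by_cases hxy : (x.1 == pr.1) = true
        · have hx1 : x.1 = '>' := by rw [hc] at hxy; exact eq_of_beq hxy
          have : (x.1 == '>' && decide (pr.2 < x.2)) = true := by
            simp [hx1, hx x (List.mem_cons_self)]
          simp [this]
        · simp [hxy]
      · have := ih X' h (fun x hxX => hx x (List.mem_cons_of_mem _ hxX))
        simp [this]

-- main invariant: the merge loop from a pending state computes A's check on the remaining trains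
theorem pvMergeLoop_eq : ∀ (bs : List Char) (as_ : List Char) (i : Int) (Pb Pa : List (Char × Int)),
    bs.length = as_.length →
    ((Pa = [] ∧ ∀ p ∈ Pb, p.1 = '>' ∧ p.2 < i) ∨ (Pb = [] ∧ ∀ p ∈ Pa, p.1 = '<' ∧ p.2 < i)) →
    pvMergeLoop bs as_ (Pb.map (·.1)) (Pa.map (·.1)) = pvG (Pb ++ pvT bs i) (Pa ++ pvT as_ i) := by
  intro bs
  induction bs with
  | nil =>
    intro as_ i Pb Pa hlen hst
    have : as_ = [] := List.length_eq_zero_iff.1 hlen.symm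
    subst this
    rcases hst with ⟨hPa, _⟩ | ⟨hPb, _⟩
    · subst hPa
      cases Pb with
      | nil => simp [pvMergeLoop, pvT, pvG, pvCheckPairs]
      | cons p Pb' => simp [pvMergeLoop, pvT, pvG]
    · subst hPb
      cases Pa with
      | nil => simp [pvMergeLoop, pvT, pvG, pvCheckPairs]
      | cons p Pa' => simp [pvMergeLoop, pvT, pvG]
  | cons cb bs' ih =>
    intro as_ i Pb Pa hlen hst
    cases as_ with
    | nil => simp at hlen
    | cons ca as' =>
      have hlen' : bs'.length = as'.length := by simpa using hlen
      have hge_b := pvT_idx_ge bs' (i + 1)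
      have hge_a := pvT_idx_ge as' (i + 1)
      by_cases htb : pvIsTrain cb = true <;> by_cases hta : pvIsTrain ca = true
      · -- both trains
        have hcb : cb = '<' ∨ cb = '>' := by
          simp only [pvIsTrain, Bool.or_eq_true, beq_iff_eq] at htb; tauto
        have hca : ca = '<' ∨ ca = '>' := by
          simp only [pvIsTrain, Bool.or_eq_true, beq_iff_eq] at hta; tauto
        rcases hst with ⟨hPa, hInvB⟩ | ⟨hPb, hInvA⟩
        · subst hPa
          cases Pb with
          | nil =>
            -- simultaneous: both queues empty
            have hstep : pvStep cb ca [] [] =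
                (if cb != ca then none else some ([], [])) := by
              simp [pvStep, htb, hta]
            by_cases hq : cb = ca
            · subst hq
              simp only [List.map_nil, pvMergeLoop, hstep, bne_self_eq_false,
                Bool.false_eq_true, if_false]
              have := ih as' (i + 1) [] [] hlen' (Or.inl ⟨rfl, by simp⟩)
              simp only [List.map_nil, List.nil_append] at this
              rw [this]
              simp only [List.nil_append, pvT, htb, hta, if_pos]
              rw [pvG_cons]
              simp
            · have hne : (cb != ca) = true := by simp [bne, hq]
              simp only [List.map_nil, pvMergeLoop, hstep, hne, if_pos]
              simp only [List.nil_append, pvT, htb, hta, if_pos]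
              rw [pvG_cons]
              simp [hq]
          | cons q Pb'' =>
            -- before ahead: push cb (must be '>'), pop q (ca must equal q.1 = '>')
            obtain ⟨qc, qi⟩ := q
            have hq1 : qc = '>' := (hInvB (qc, qi) List.mem_cons_self).1
            have hq2 : qi < i := (hInvB (qc, qi) List.mem_cons_self).2
            subst hq1
            have hInvB' : ∀ p ∈ Pb'', p.1 = '>' ∧ p.2 < i :=
              fun p hp => hInvB p (List.mem_cons_of_mem _ hp)
            have hX : (('>', qi) :: Pb'') ++ pvT (cb :: bs') i =
                ('>', qi) :: (Pb'' ++ [(cb, i)] ++ pvT bs' (i + 1)) := by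
              simp [pvT, htb]
            have hY : ([] : List (Char × Int)) ++ pvT (ca :: as') i =
                (ca, i) :: pvT as' (i + 1) := by
              simp [pvT, hta]
            rw [hX, hY, pvG_cons]
            rcases hcb with hcb | hcb <;> rcases hca with hca | hca <;> subst hcb <;> subst hca
            · -- cb='<', ca='<': LHS false (push check); RHS head (q.1==ca)=false
              have hstep : pvStep '<' '<' ('>' :: Pb''.map (·.1)) [] = none := by
                simp [pvStep, pvIsTrain]
              simp [pvMergeLoop, hstep]
            · -- cb='<', ca='>': LHS false; RHS false via pending '<'
              have hstep : pvStep '<' '>' ('>' :: Pb''.map (·.1)) [] = none := by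
                simp [pvStep, pvIsTrain]
              have hbad : pvG (Pb'' ++ [('<', i)] ++ pvT bs' (i + 1)) (pvT as' (i + 1)) = false := by
                apply pvG_bad_b _ _ (('<', i)) (by simp) rfl
                intro y hy; have := hge_a y hy; omega
              simp only [List.append_assoc, List.singleton_append, List.nil_append] at hbad
              simp [pvMergeLoop, hstep, hbad]
            · -- cb='>', ca='<': LHS false (pop check ca≠q.1); RHS head false
              have hstep : pvStep '>' '<' ('>' :: Pb''.map (·.1)) [] = none := by
                simp [pvStep, pvIsTrain]
              simp [pvMergeLoop, hstep]
            · -- cb='>', ca='>': both proceed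
              have hstep : pvStep '>' '>' ('>' :: Pb''.map (·.1)) [] =
                  some (Pb''.map (·.1) ++ ['>'], []) := by
                simp [pvStep, pvIsTrain]
              simp only [pvMergeLoop, List.map_cons, List.map_nil, hstep]
              have := ih as' (i + 1) (Pb'' ++ [('>', i)]) [] hlen'
                (Or.inl ⟨rfl, by
                  intro p hp
                  rcases List.mem_append.1 hp with hp | hp
                  · have := hInvB' p hp; exact ⟨this.1, by omega⟩
                  · simp at hp; subst hp; exact ⟨rfl, by omega⟩⟩)
              simp only [List.map_nil, List.map_append, List.map_cons,
                List.nil_append] at this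
              rw [this]
              have : ¬ (i < qi) := by omega
              simp [this, List.append_assoc]
        · subst hPb
          cases Pa with
          | nil =>
            -- both queues empty: simultaneous case again
            have hstep : pvStep cb ca [] [] =
                (if cb != ca then none else some ([], [])) := by
              simp [pvStep, htb, hta]
            by_cases hq : cb = ca
            · subst hq
              simp only [List.map_nil, pvMergeLoop, hstep, bne_self_eq_false,
                Bool.false_eq_true, if_false]
              have := ih as' (i + 1) [] [] hlen' (Or.inl ⟨rfl, by simp⟩)
              simp only [List.map_nil, List.nil_append] at this
              rw [this]
              simp only [List.nil_append, pvT, htb, hta, if_pos]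
              rw [pvG_cons]
              simp
            · have hne : (cb != ca) = true := by simp [bne, hq]
              simp only [List.map_nil, pvMergeLoop, hstep, hne, if_pos]
              simp only [List.nil_append, pvT, htb, hta, if_pos]
              rw [pvG_cons]
              simp [hq]
          | cons q Pa' =>
            -- after ahead: cb pops q (cb must equal q.1 = '<'), ca pushed (must be '<')
            obtain ⟨qc, qi⟩ := q
            have hq1 : qc = '<' := (hInvA (qc, qi) List.mem_cons_self).1
            have hq2 : qi < i := (hInvA (qc, qi) List.mem_cons_self).2
            subst hq1
            have hInvA' : ∀ p ∈ Pa', p.1 = '<' ∧ p.2 < i :=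
              fun p hp => hInvA p (List.mem_cons_of_mem _ hp)
            have hX : ([] : List (Char × Int)) ++ pvT (cb :: bs') i =
                (cb, i) :: pvT bs' (i + 1) := by
              simp [pvT, htb]
            have hY : (('<', qi) :: Pa') ++ pvT (ca :: as') i =
                ('<', qi) :: (Pa' ++ [(ca, i)] ++ pvT as' (i + 1)) := by
              simp [pvT, hta]
            rw [hX, hY, pvG_cons]
            rcases hcb with hcb | hcb <;> rcases hca with hca | hca <;> subst hcb <;> subst hca
            · -- cb='<', ca='<': both proceed
              have hstep : pvStep '<' '<' [] ('<' :: Pa'.map (·.1)) =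
                  some ([], Pa'.map (·.1) ++ ['<']) := by
                simp [pvStep, pvIsTrain]
              simp only [pvMergeLoop, List.map_nil, List.map_cons, hstep]
              have := ih as' (i + 1) [] (Pa' ++ [('<', i)]) hlen'
                (Or.inr ⟨rfl, by
                  intro p hp
                  rcases List.mem_append.1 hp with hp | hp
                  · have := hInvA' p hp; exact ⟨this.1, by omega⟩
                  · simp at hp; subst hp; exact ⟨rfl, by omega⟩⟩)
              simp only [List.map_nil, List.map_append, List.map_cons,
                List.nil_append] at this
              rw [this]
              have : ¬ (qi > i) := by omega
              simp [this, List.append_assoc]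
            · -- cb='<', ca='>': pop ok but push check fails; RHS false via pending '>'
              have hstep : pvStep '<' '>' [] ('<' :: Pa'.map (·.1)) = none := by
                simp [pvStep, pvIsTrain]
              have hbad : pvG (pvT bs' (i + 1)) (Pa' ++ [('>', i)] ++ pvT as' (i + 1)) = false := by
                apply pvG_bad_a _ _ (('>', i)) (by simp) rfl
                intro x hx; have := hge_b x hx; omega
              simp only [List.append_assoc, List.singleton_append, List.nil_append] at hbad
              simp [pvMergeLoop, hstep, hbad]
            · -- cb='>', ca='<': pop check fails (cb ≠ q.1); RHS head false
              have hstep : pvStep '>' '<' [] ('<' :: Pa'.map (·.1)) = none := by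
                simp [pvStep, pvIsTrain]
              have : qi < i := hq2
              simp [pvMergeLoop, hstep, this]
            · -- cb='>', ca='>': pop check fails; RHS head false
              have hstep : pvStep '>' '>' [] ('<' :: Pa'.map (·.1)) = none := by
                simp [pvStep, pvIsTrain]
              have : qi < i := hq2
              simp [pvMergeLoop, hstep, this]
      · -- only before is a train: push cb, must be '>'
        have hcb : cb = '<' ∨ cb = '>' := by
          simp only [pvIsTrain, Bool.or_eq_true, beq_iff_eq] at htb; tauto
        have hta' := hta
        simp only [pvIsTrain, Bool.or_eq_true, not_or, Bool.not_eq_true] at hta'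
        obtain ⟨hca1, hca2⟩ := hta'
        rcases hst with ⟨hPa, hInvB⟩ | ⟨hPb, hInvA⟩
        · subst hPa
          have hX : Pb ++ pvT (cb :: bs') i = (Pb ++ [(cb, i)]) ++ pvT bs' (i + 1) := by
            simp [pvT, htb]
          have hY : ([] : List (Char × Int)) ++ pvT (ca :: as') i = pvT as' (i + 1) := by
            simp [pvT, hta]
          rw [hX, hY]
          rcases hcb with hcb | hcb <;> subst hcb
          · have hstep : pvStep '<' ca (Pb.map (·.1)) [] = none := by
              simp [pvStep, pvIsTrain, hca1, hca2]
            have hbad : pvG ((Pb ++ [('<', i)]) ++ pvT bs' (i + 1)) (pvT as' (i + 1)) = false := by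
              apply pvG_bad_b _ _ (('<', i)) (by simp) rfl
              intro y hy; have := hge_a y hy; omega
            simp only [List.append_assoc, List.singleton_append, List.nil_append] at hbad
            simp [pvMergeLoop, hstep, hbad]
          · have hstep : pvStep '>' ca (Pb.map (·.1)) [] =
                some (Pb.map (·.1) ++ ['>'], []) := by
              simp [pvStep, pvIsTrain, hca1, hca2]
            simp only [pvMergeLoop, List.map_nil, hstep]
            have := ih as' (i + 1) (Pb ++ [('>', i)]) [] hlen'
              (Or.inl ⟨rfl, by
                intro p hp
                rcases List.mem_append.1 hp with hp | hp
                · have := hInvB p hp; exact ⟨this.1, by omega⟩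
                · simp at hp; subst hp; exact ⟨rfl, by omega⟩⟩)
            simp only [List.map_nil, List.map_append, List.map_cons,
              List.nil_append] at this
            rw [this]
        · subst hPb
          cases Pa with
          | nil =>
            -- both empty: push cb, must be '>'
            have hX : ([] : List (Char × Int)) ++ pvT (cb :: bs') i =
                ([] ++ [(cb, i)]) ++ pvT bs' (i + 1) := by
              simp [pvT, htb]
            have hY : ([] : List (Char × Int)) ++ pvT (ca :: as') i = pvT as' (i + 1) := by
              simp [pvT, hta]
            rw [hX, hY]
            rcases hcb with hcb | hcb <;> subst hcb
            · have hstep : pvStep '<' ca [] [] = none := by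
                simp [pvStep, pvIsTrain, hca1, hca2]
              have hbad : pvG (([] ++ [('<', i)]) ++ pvT bs' (i + 1)) (pvT as' (i + 1)) = false := by
                apply pvG_bad_b _ _ (('<', i)) (by simp) rfl
                intro y hy; have := hge_a y hy; omega
              simp only [List.append_assoc, List.singleton_append, List.nil_append] at hbad
              simp [pvMergeLoop, hstep, hbad]
            · have hstep : pvStep '>' ca [] [] = some (['>'], []) := by
                simp [pvStep, pvIsTrain, hca1, hca2]
              simp only [pvMergeLoop, List.map_nil, hstep]
              have := ih as' (i + 1) ([] ++ [('>', i)]) [] hlen'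
                (Or.inl ⟨rfl, by intro p hp; simp at hp; subst hp; exact ⟨rfl, by omega⟩⟩)
              simp only [List.map_nil, List.map_append, List.map_cons,
                List.nil_append] at this
              rw [this]
              simp
          | cons q Pa' =>
            -- after ahead: cb pops q, must equal q.1 = '<'
            obtain ⟨qc, qi⟩ := q
            have hq1 : qc = '<' := (hInvA (qc, qi) List.mem_cons_self).1
            have hq2 : qi < i := (hInvA (qc, qi) List.mem_cons_self).2
            subst hq1
            have hInvA' : ∀ p ∈ Pa', p.1 = '<' ∧ p.2 < i :=
              fun p hp => hInvA p (List.mem_cons_of_mem _ hp)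
            have hX : ([] : List (Char × Int)) ++ pvT (cb :: bs') i =
                (cb, i) :: pvT bs' (i + 1) := by
              simp [pvT, htb]
            have hY : (('<', qi) :: Pa') ++ pvT (ca :: as') i =
                ('<', qi) :: (Pa' ++ pvT as' (i + 1)) := by
              simp [pvT, hta]
            rw [hX, hY, pvG_cons]
            rcases hcb with hcb | hcb <;> subst hcb
            · have hstep : pvStep '<' ca [] ('<' :: Pa'.map (·.1)) =
                  some ([], Pa'.map (·.1)) := by
                simp [pvStep, pvIsTrain, hca1, hca2]
              simp only [pvMergeLoop, List.map_nil, List.map_cons, hstep]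
              have := ih as' (i + 1) [] Pa' hlen'
                (Or.inr ⟨rfl, fun p hp => ⟨(hInvA' p hp).1, by have := (hInvA' p hp).2; omega⟩⟩)
              simp only [List.map_nil, List.nil_append] at this
              rw [this]
              have : ¬ (qi > i) := by omega
              simp [this]
            · have hstep : pvStep '>' ca [] ('<' :: Pa'.map (·.1)) = none := by
                simp [pvStep, pvIsTrain, hca1, hca2]
              have : qi < i := hq2
              simp [pvMergeLoop, hstep, this]
      · -- only after is a train
        have hca : ca = '<' ∨ ca = '>' := by
          simp only [pvIsTrain, Bool.or_eq_true, beq_iff_eq] at hta; tauto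
        have htb' := htb
        simp only [pvIsTrain, Bool.or_eq_true, not_or, Bool.not_eq_true] at htb'
        obtain ⟨hcb1, hcb2⟩ := htb'
        rcases hst with ⟨hPa, hInvB⟩ | ⟨hPb, hInvA⟩
        · subst hPa
          cases Pb with
          | nil =>
            have hX : ([] : List (Char × Int)) ++ pvT (cb :: bs') i = pvT bs' (i + 1) := by
              simp [pvT, htb]
            have hY : ([] : List (Char × Int)) ++ pvT (ca :: as') i =
                ([] ++ [(ca, i)]) ++ pvT as' (i + 1) := by
              simp [pvT, hta]
            rw [hX, hY]
            rcases hca with hca | hca <;> subst hca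
            · have hstep : pvStep cb '<' [] [] = some ([], ['<']) := by
                simp [pvStep, pvIsTrain, hcb1, hcb2]
              simp only [pvMergeLoop, List.map_nil, hstep]
              have := ih as' (i + 1) [] ([] ++ [('<', i)]) hlen'
                (Or.inr ⟨rfl, by intro p hp; simp at hp; subst hp; exact ⟨rfl, by omega⟩⟩)
              simp only [List.map_nil, List.map_append, List.map_cons,
                List.nil_append] at this
              rw [this]
              simp
            · have hstep : pvStep cb '>' [] [] = none := by
                simp [pvStep, pvIsTrain, hcb1, hcb2]
              have hbad : pvG (pvT bs' (i + 1)) (([] ++ [('>', i)]) ++ pvT as' (i + 1)) = false := by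
                apply pvG_bad_a _ _ (('>', i)) (by simp) rfl
                intro x hx; have := hge_b x hx; omega
              simp only [List.append_assoc, List.singleton_append, List.nil_append] at hbad
              simp [pvMergeLoop, hstep, hbad]
          | cons q Pb'' =>
            -- before ahead: ca pops q, must equal q.1 = '>'
            obtain ⟨qc, qi⟩ := q
            have hq1 : qc = '>' := (hInvB (qc, qi) List.mem_cons_self).1
            have hq2 : qi < i := (hInvB (qc, qi) List.mem_cons_self).2
            subst hq1
            have hInvB' : ∀ p ∈ Pb'', p.1 = '>' ∧ p.2 < i :=
              fun p hp => hInvB p (List.mem_cons_of_mem _ hp)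
            have hX : (('>', qi) :: Pb'') ++ pvT (cb :: bs') i =
                ('>', qi) :: (Pb'' ++ pvT bs' (i + 1)) := by
              simp [pvT, htb]
            have hY : ([] : List (Char × Int)) ++ pvT (ca :: as') i =
                (ca, i) :: pvT as' (i + 1) := by
              simp [pvT, hta]
            rw [hX, hY, pvG_cons]
            rcases hca with hca | hca <;> subst hca
            · have hstep : pvStep cb '<' ('>' :: Pb''.map (·.1)) [] = none := by
                simp [pvStep, pvIsTrain, hcb1, hcb2]
              simp [pvMergeLoop, hstep]
            · have hstep : pvStep cb '>' ('>' :: Pb''.map (·.1)) [] =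
                  some (Pb''.map (·.1), []) := by
                simp [pvStep, pvIsTrain, hcb1, hcb2]
              simp only [pvMergeLoop, List.map_cons, List.map_nil, hstep]
              have := ih as' (i + 1) Pb'' [] hlen'
                (Or.inl ⟨rfl, fun p hp => ⟨(hInvB' p hp).1, by have := (hInvB' p hp).2; omega⟩⟩)
              simp only [List.map_nil, List.nil_append] at this
              rw [this]
              have : ¬ (i < qi) := by omega
              simp [this]
        · subst hPb
          -- after pending or empty: ca pushed, must be '<'
          have hX : ([] : List (Char × Int)) ++ pvT (cb :: bs') i = pvT bs' (i + 1) := by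
            simp [pvT, htb]
          have hY : Pa ++ pvT (ca :: as') i = (Pa ++ [(ca, i)]) ++ pvT as' (i + 1) := by
            simp [pvT, hta]
          rw [hX, hY]
          rcases hca with hca | hca <;> subst hca
          · have hstep : pvStep cb '<' [] (Pa.map (·.1)) =
                some ([], Pa.map (·.1) ++ ['<']) := by
              simp [pvStep, pvIsTrain, hcb1, hcb2]
            simp only [pvMergeLoop, List.map_nil, hstep]
            have := ih as' (i + 1) [] (Pa ++ [('<', i)]) hlen'
              (Or.inr ⟨rfl, by
                intro p hp
                rcases List.mem_append.1 hp with hp | hp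
                · have := hInvA p hp; exact ⟨this.1, by omega⟩
                · simp at hp; subst hp; exact ⟨rfl, by omega⟩⟩)
            simp only [List.map_nil, List.map_append, List.map_cons,
              List.nil_append] at this
            rw [this]
          · have hstep : pvStep cb '>' [] (Pa.map (·.1)) = none := by
              simp [pvStep, pvIsTrain, hcb1, hcb2]
            have hbad : pvG (pvT bs' (i + 1)) ((Pa ++ [('>', i)]) ++ pvT as' (i + 1)) = false := by
              apply pvG_bad_a _ _ (('>', i)) (by simp) rfl
              intro x hx; have := hge_b x hx; omega
            simp only [List.append_assoc, List.singleton_append, List.nil_append] at hbad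
            simp [pvMergeLoop, hstep, hbad]
      · -- neither is a train: skip both
        have hstep : pvStep cb ca (Pb.map (·.1)) (Pa.map (·.1)) = some (Pb.map (·.1), Pa.map (·.1)) := by
          simp [pvStep, htb, hta]
        have hX : Pb ++ pvT (cb :: bs') i = Pb ++ pvT bs' (i + 1) := by
          simp [pvT, htb]
        have hY : Pa ++ pvT (ca :: as') i = Pa ++ pvT as' (i + 1) := by
          simp [pvT, hta]
        rw [hX, hY]
        simp only [pvMergeLoop, List.map_nil, hstep]
        exact ih as' (i + 1) Pb Pa hlen' (by
          rcases hst with ⟨hPa, hInvB⟩ | ⟨hPb, hInvA⟩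
          · exact Or.inl ⟨hPa, fun p hp => ⟨(hInvB p hp).1, by have := (hInvB p hp).2; omega⟩⟩
          · exact Or.inr ⟨hPb, fun p hp => ⟨(hInvA p hp).1, by have := (hInvA p hp).2; omega⟩⟩)

-- ===== VERDICT (by name: the statement is the Claim_ definition above) =====
theorem is_valid_train_arrangement_spec : Claim_equal_is_valid_train_arrangement := by
  intro before after _hdom
  unfold Spec_is_valid_train_arrangement is_valid_train_arrangement is_valid_train_arrangement_alt
  by_cases h : (PySem.Str.len before != PySem.Str.len after) = true
  · rw [if_pos h, if_pos h]
  · rw [if_neg h, if_neg h]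
    have hlen : before.toList.length = after.toList.length := by
      simp only [bne_iff_ne, ne_eq, not_not] at h
      simpa [PySem.Str.len_eq] using congrArg Int.toNat h
    have := pvMergeLoop_eq before.toList after.toList 0 [] [] hlen (Or.inl ⟨rfl, by simp⟩)
    simp only [List.map_nil, List.nil_append] at this
    rw [this]
    simp only [pvT_eq_enum, pvG]
    cases h2 : (List.map (fun x => x.1) (pvT before.toList 0) == List.map (fun x => x.1) (pvT after.toList 0)) <;>
      simp [bne, h2]
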